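-- pv_equiv track=rewrite | github.com/mlefebvre1/projecteuler-python | project_euler/problems/problem98.py | get_square_candidates
-- ===== SOURCE A (Python) =====
-- def get_square_candidates(nb_digits):
--     def get_squared(max_n):
--         nb_digits_max = len(str(max_n))
--         categories = [[] for _ in range(nb_digits_max)]
--         n = 1
--         while 1:
--             n2 = n * n
--             if n2 > max_n:
--                 break
--             nb_digits = len(str(n2))
--             categories[nb_digits - 1].append(str(n2))
--             n += 1
--         return categories
--
--     def digit_validate(n, nb_digits):
--         n_str = str(n)
--         if len(n_str) != nb_digits:
--             return False
--         mem = [0] * 10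
--         for c in n_str:
--             if mem[int(c)] == 1:
--                 return False
--             else:
--                 mem[int(c)] += 1
--         return True
--
--     squared_candidates = []
--     categories = get_squared(10**nb_digits)
--     for category in categories:
--         for n in category:
--             if digit_validate(n, nb_digits):
--                 squared_candidates.append(n)
--     return squared_candidates
-- ===== SOURCE B (Python) =====
-- def get_square_candidates(nb_digits):
--     result = []
--     limit = 10 ** nb_digits
--     n = 1
--     while n * n < limit:
--         s = str(n * n)
--         if len(s) == nb_digits and len(set(s)) == len(s):
--             result.append(s)
--         n += 1
--     return result
-- ===== Notes on version B (the rewrite author's own statement) =====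
-- stated objective: simpler
-- what changed: One single pass that keeps a square's string directly when it has nb_digits digits and len(set(s)) == len(s), replacing A's two-phase design of binning every square into per-digit-count category lists and then flattening and filtering them with a 10-slot count-array validator.
import Mathlib
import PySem

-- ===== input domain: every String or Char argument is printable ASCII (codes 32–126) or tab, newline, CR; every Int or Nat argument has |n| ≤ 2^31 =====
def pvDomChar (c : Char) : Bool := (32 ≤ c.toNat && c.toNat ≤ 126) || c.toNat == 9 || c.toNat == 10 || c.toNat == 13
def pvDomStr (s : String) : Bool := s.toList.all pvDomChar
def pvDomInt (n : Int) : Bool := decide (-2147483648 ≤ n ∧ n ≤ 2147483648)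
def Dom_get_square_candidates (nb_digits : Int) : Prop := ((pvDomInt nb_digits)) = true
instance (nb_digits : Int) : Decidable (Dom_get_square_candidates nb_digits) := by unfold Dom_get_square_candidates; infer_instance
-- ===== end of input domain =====

-- B replaces A's two-phase design (bin squares into per-digit-count categories, then flatten and
-- filter with a 10-slot count array) by one pass that filters each square directly; same values.

-- ===== PORT A =====
-- digit_validate's for-loop over the characters; `mem` is the 10-slot count list.  int(c): every
-- character here is a single decimal digit (the strings are str(n*n)), so PySem.Int.ofStr? is
-- `some`; `.getD 0` only totalises the unreachable ValueError path (exact on reachable inputs).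
def pvDvLoop (cs : List Char) (mem : List Int) : Bool :=
  match cs with
  | [] => true
  | c :: rest =>
    let i := ((PySem.Int.ofStr? (String.mk [c])).getD 0).toNat
    if mem.getD i 0 = 1 then false
    else pvDvLoop rest (mem.set i (mem.getD i 0 + 1))

-- digit_validate(n, nb_digits); n is always already a string here, so str(n) = n itself.
def pvDigitValidate (s : String) (nb_digits : Int) : Bool :=
  if PySem.Str.len s ≠ nb_digits then false
  else pvDvLoop s.toList (List.replicate 10 0)

-- get_squared's `while 1` loop; `fuel` only bounds the iteration count (the break fires long
-- before it runs out).  categories[nb_digits - 1].append(...): the index is always in range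
-- (proved below), so List.set/getD are exact (Python would raise IndexError out of range).
-- Python's list.append is O(1), so each category is built here by consing (reverse order) and
-- reversed once after the loop — the same list Python builds, without a quadratic copy.
def pvGsLoop (max_n : Int) (fuel : Nat) (n : Int) (cats : List (List String)) : List (List String) :=
  match fuel with
  | 0 => cats
  | fuel + 1 =>
    let n2 := n * n
    if n2 > max_n then cats
    else
      let s := PySem.Int.toStr n2
      let i := (PySem.Str.len s - 1).toNat
      pvGsLoop max_n fuel (n + 1) (cats.set i (s :: cats.getD i []))

-- For nb_digits < 0 Python computes 10**nb_digits as a float in [0, 1); then n*n = 1 > max_n at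
-- the very first test, every category stays empty and the function returns [] — ported as [].
def get_square_candidates (nb_digits : Int) : List String :=
  if nb_digits < 0 then []
  else
    let max_n : Int := 10 ^ nb_digits.toNat
    let nbmax := (PySem.Str.len (PySem.Int.toStr max_n)).toNat
    let categories := (pvGsLoop max_n (max_n.toNat + 1) 1 (List.replicate nbmax [])).map
      List.reverse
    categories.foldl (fun acc cat =>
      cat.foldl (fun acc2 s => if pvDigitValidate s nb_digits then acc2 ++ [s] else acc2) acc) []

-- ===== PORT B =====
-- the single while-loop of Source B; fuel only bounds the iteration count.
def pvBLoop (nb_digits limit : Int) (fuel : Nat) (n : Int) (result : List String) : List String :=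
  match fuel with
  | 0 => result
  | fuel + 1 =>
    if n * n < limit then
      let s := PySem.Int.toStr (n * n)
      let result' :=
        if PySem.Str.len s = nb_digits ∧
            PySem.Set.len (PySem.Set.ofList s.toList) = PySem.Str.len s
        then result ++ [s] else result
      pvBLoop nb_digits limit fuel (n + 1) result'
    else result

-- same float note as in port A: for nb_digits < 0 the condition 1*1 < 10**nb_digits is false
-- at once and the result is [].
def get_square_candidates_alt (nb_digits : Int) : List String :=
  if nb_digits < 0 then []
  else
    let limit : Int := 10 ^ nb_digits.toNat
    pvBLoop nb_digits limit (limit.toNat + 1) 1 []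

-- ===== PRECONDITION & SPEC =====
def Spec_get_square_candidates (nb_digits : Int) (out : List String) : Prop := out = get_square_candidates_alt nb_digits
instance (nb_digits : Int) (out : List String) : Decidable (Spec_get_square_candidates nb_digits out) := by unfold Spec_get_square_candidates; infer_instance

-- ===== CLAIM (what is proved, stated in full; the proofs are below) =====
def Claim_equal_get_square_candidates : Prop := ∀ (nb_digits : Int), Dom_get_square_candidates nb_digits → Spec_get_square_candidates nb_digits (get_square_candidates nb_digits)

-- ===== LEMMAS AND PROOFS =====

-- decimal digit characters of n, most significant first (mathematical model of Nat.toDigits 10)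
def pvD (n : Nat) : List Char :=
  (if h : n < 10 then [] else pvD (n / 10)) ++ [Nat.digitChar (n % 10)]
decreasing_by exact Nat.div_lt_self (by omega) (by omega)

lemma pvToDigitsCore_eq (f : Nat) : ∀ n ds, n < f →
    Nat.toDigitsCore 10 f n ds = pvD n ++ ds := by
  induction f with
  | zero => intro n ds h; omega
  | succ f ih =>
    intro n ds h
    rw [Nat.toDigitsCore, pvD]
    by_cases h10 : n < 10
    · have : n / 10 = 0 := by omega
      simp [this, h10]
    · have hne : ¬ n / 10 = 0 := by omega
      have hlt : n / 10 < n := Nat.div_lt_self (by omega) (by omega)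
      simp only [hne, if_neg, h10, dif_neg]
      rw [ih (n / 10) _ (by omega)]
      simp

lemma pvToChars_nonneg (m : Int) (h : 0 ≤ m) : PySem.Int.toChars m = pvD m.toNat := by
  rw [PySem.Int.toChars]
  rw [if_neg (by omega)]
  rw [Nat.toDigits, pvToDigitsCore_eq (m.toNat + 1) m.toNat [] (by omega)]
  simp

lemma pvToStr_toList (m : Int) (h : 0 ≤ m) : (PySem.Int.toStr m).toList = pvD m.toNat := by
  rw [PySem.Int.toList_toStr, pvToChars_nonneg m h]

lemma pvD_length_pos (n : Nat) : 1 ≤ (pvD n).length := by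
  rw [pvD]; simp

lemma pvD_lt_pow (n : Nat) : n < 10 ^ (pvD n).length := by
  induction n using Nat.strong_induction_on with
  | _ n ih =>
    rw [pvD]
    by_cases h10 : n < 10
    · rw [dif_pos h10]; simpa using h10
    · rw [dif_neg h10]
      have hlt : n / 10 < n := Nat.div_lt_self (by omega) (by omega)
      have ihh := ih (n / 10) hlt
      simp only [List.length_append, List.length_cons, List.length_nil]
      rw [pow_succ]
      omega

lemma pvD_pow_le (n : Nat) (h : 1 ≤ n) : 10 ^ ((pvD n).length - 1) ≤ n := by
  induction n using Nat.strong_induction_on with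
  | _ n ih =>
    rw [pvD]
    by_cases h10 : n < 10
    · rw [dif_pos h10]; simpa using h
    · rw [dif_neg h10]
      have hlt : n / 10 < n := Nat.div_lt_self (by omega) (by omega)
      have hd := ih (n / 10) hlt (by omega)
      simp only [List.length_append, List.length_cons, List.length_nil]
      have hL : 1 ≤ (pvD (n / 10)).length := pvD_length_pos _
      have he : (pvD (n / 10)).length + 1 - 1 = ((pvD (n / 10)).length - 1) + 1 := by omega
      rw [he, pow_succ]
      have h2 : 10 ^ ((pvD (n / 10)).length - 1) * 10 ≤ n / 10 * 10 :=
        Nat.mul_le_mul_right _ hd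
      omega

lemma pvD_digits (n : Nat) : ∀ c ∈ pvD n, ∃ v, v < 10 ∧ c = Nat.digitChar v := by
  induction n using Nat.strong_induction_on with
  | _ n ih =>
    rw [pvD]
    intro c hc
    rcases List.mem_append.1 hc with h | h
    · by_cases h10 : n < 10
      · simp [h10] at h
      · exact ih (n / 10) (Nat.div_lt_self (by omega) (by omega)) c (by simpa [h10] using h)
    · simp at h
      exact ⟨n % 10, by omega, h⟩

lemma pvDigitChar_inj (v w : Nat) (hv : v < 10) (hw : w < 10)
    (h : Nat.digitChar v = Nat.digitChar w) : v = w := by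
  interval_cases v <;> interval_cases w <;> simp_all [Nat.digitChar]

lemma pvIntOfDigitChar (v : Nat) (hv : v < 10) :
    ((PySem.Int.ofStr? (String.mk [Nat.digitChar v])).getD 0) = (v : Int) := by
  interval_cases v <;> decide

lemma pvGetD_set_self {α : Type} (l : List α) (i : Nat) (v d : α) (h : i < l.length) :
    (l.set i v).getD i d = v := by
  simp [List.getD_eq_getElem?_getD, List.getElem?_set_self, h]

lemma pvGetD_set_ne {α : Type} (l : List α) (i j : Nat) (v d : α) (h : i ≠ j) :
    (l.set i v).getD j d = l.getD j d := by
  simp [List.getD_eq_getElem?_getD, List.getElem?_set_ne h]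

lemma pvDvLoop_iff (cs : List Char) : ∀ (seen : List Char) (mem : List Int),
    (∀ c ∈ cs, ∃ v, v < 10 ∧ c = Nat.digitChar v) →
    (∀ c ∈ seen, ∃ v, v < 10 ∧ c = Nat.digitChar v) →
    mem.length = 10 →
    (∀ v, v < 10 → mem.getD v 0 = if Nat.digitChar v ∈ seen then 1 else 0) →
    (pvDvLoop cs mem = true ↔ (cs.Nodup ∧ ∀ c ∈ cs, c ∉ seen)) := by
  induction cs with
  | nil => intro seen mem _ _ _ _; simp [pvDvLoop]
  | cons c rest ih =>
    intro seen mem hcs hseen hlen hmem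
    obtain ⟨v, hv, rfl⟩ := hcs c (by simp)
    rw [pvDvLoop]
    simp only [pvIntOfDigitChar v hv, Int.toNat_natCast, hmem v hv]
    by_cases hin : Nat.digitChar v ∈ seen
    · rw [if_pos hin, if_pos rfl]
      constructor
      · intro h; cases h
      · rintro ⟨_, hni⟩
        exact absurd hin (hni _ (List.mem_cons_self))
    · rw [if_neg hin, if_neg (by omega)]
      have hset : ∀ w, w < 10 →
          (mem.set v (0 + 1)).getD w 0 = if Nat.digitChar w ∈ seen ++ [Nat.digitChar v] then 1 else 0 := by
        intro w hw
        by_cases hwv : w = v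
        · subst hwv
          rw [pvGetD_set_self _ _ _ _ (by omega)]
          simp
        · rw [pvGetD_set_ne _ _ _ _ _ (fun h => hwv h.symm), hmem w hw]
          have hne : Nat.digitChar w ≠ Nat.digitChar v :=
            fun h => hwv (pvDigitChar_inj w v hw hv h)
          simp [hne]
      rw [ih (seen ++ [Nat.digitChar v]) (mem.set v (0 + 1))
        (fun x hx => hcs x (by simp [hx]))
        (fun x hx => by
          rcases List.mem_append.1 hx with h | h
          · exact hseen x h
          · exact ⟨v, hv, by simpa using h⟩)
        (by simp [hlen]) hset]
      constructor
      · rintro ⟨hnd, hni⟩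
        have hcr : Nat.digitChar v ∉ rest := fun hr =>
          (hni _ hr) (List.mem_append.2 (Or.inr (List.mem_singleton.2 rfl)))
        refine ⟨List.nodup_cons.2 ⟨hcr, hnd⟩, fun x hx => ?_⟩
        rcases List.mem_cons.1 hx with rfl | hx
        · exact hin
        · exact fun hs => (hni x hx) (List.mem_append.2 (Or.inl hs))
      · rintro ⟨hnd, hni⟩
        have hcr := (List.nodup_cons.1 hnd).1
        refine ⟨(List.nodup_cons.1 hnd).2, fun x hx hx2 => ?_⟩
        rcases List.mem_append.1 hx2 with hs | hs
        · exact (hni x (List.mem_cons.2 (Or.inr hx))) hs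
        · rw [List.mem_singleton.1 hs] at hx
          exact hcr hx

lemma pvSet_ofList_append (cs : List Char) (c : Char) :
    PySem.Set.ofList (cs ++ [c]) = PySem.Set.add (PySem.Set.ofList cs) c := by
  rw [PySem.Set.ofList_eq_foldl, PySem.Set.ofList_eq_foldl, List.foldl_append]
  rfl

lemma pvSet_len_le (cs : List Char) : (PySem.Set.ofList cs).length ≤ cs.length := by
  induction cs using List.reverseRecOn with
  | nil => simp [PySem.Set.ofList]
  | append_singleton cs c ih =>
    rw [pvSet_ofList_append, PySem.Set.add]
    split
    · simpa using Nat.le_succ_of_le ih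
    · simpa using ih

lemma pvSet_len_iff (cs : List Char) :
    (PySem.Set.ofList cs).length = cs.length ↔ cs.Nodup := by
  induction cs using List.reverseRecOn with
  | nil => simp [PySem.Set.ofList]
  | append_singleton cs c ih =>
    have hmem : (PySem.Set.ofList cs).contains c = true ↔ c ∈ cs := by
      simp [PySem.Set.contains, PySem.Set.mem_ofList]
    rw [pvSet_ofList_append, PySem.Set.add]
    by_cases hc : c ∈ cs
    · rw [if_pos (hmem.2 hc)]
      have hle := pvSet_len_le cs
      rw [List.length_append]
      simp only [List.length_cons, List.length_nil]
      constructor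
      · intro h; omega
      · intro h
        rcases List.nodup_append.1 h with ⟨_, _, hdisj⟩
        exact absurd rfl (hdisj c hc c (List.mem_singleton.2 rfl))
    · rw [if_neg (fun h => hc (hmem.1 h))]
      rw [List.length_append, List.length_append]
      simp only [List.length_cons, List.length_nil]
      constructor
      · intro h
        refine List.nodup_append.2 ⟨ih.1 (by omega), List.nodup_singleton c, ?_⟩
        intro a ha b hb hab
        rw [List.mem_singleton.1 hb] at hab
        exact hc (hab ▸ ha)
      · intro h
        rcases List.nodup_append.1 h with ⟨h1, _, _⟩
        have := ih.2 h1
        omega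

lemma pvValid_eq (m nb : Int) (h : 1 ≤ m) :
    pvDigitValidate (PySem.Int.toStr m) nb =
      decide (PySem.Str.len (PySem.Int.toStr m) = nb ∧
        PySem.Set.len (PySem.Set.ofList (PySem.Int.toStr m).toList) =
          PySem.Str.len (PySem.Int.toStr m)) := by
  have hts : (PySem.Int.toStr m).toList = pvD m.toNat := pvToStr_toList m (by omega)
  have hdv : pvDvLoop (PySem.Int.toStr m).toList (List.replicate 10 0) = true ↔
      (PySem.Int.toStr m).toList.Nodup := by
    rw [pvDvLoop_iff _ [] _ (by rw [hts]; exact pvD_digits _) (by simp) (by simp)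
      (fun v hv => by interval_cases v <;> rfl)]
    simp
  have hset : (PySem.Set.len (PySem.Set.ofList (PySem.Int.toStr m).toList) =
      PySem.Str.len (PySem.Int.toStr m)) ↔ (PySem.Int.toStr m).toList.Nodup := by
    rw [PySem.Set.len, PySem.Str.len_eq, Nat.cast_inj]
    exact pvSet_len_iff _
  unfold pvDigitValidate
  by_cases hlen : PySem.Str.len (PySem.Int.toStr m) = nb
  · rw [if_neg (by simpa using hlen)]
    cases hb : pvDvLoop (PySem.Int.toStr m).toList (List.replicate 10 0)
    · have hnot : ¬ (PySem.Int.toStr m).toList.Nodup := fun hn => by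
        rw [hdv.2 hn] at hb; cases hb
      symm
      rw [decide_eq_false_iff_not]
      rintro ⟨_, hs⟩
      exact hnot (hset.1 hs)
    · symm
      rw [decide_eq_true_iff]
      exact ⟨hlen, hset.2 (hdv.1 hb)⟩
  · rw [if_pos hlen]
    symm
    rw [decide_eq_false_iff_not]
    rintro ⟨h1, _⟩
    exact hlen h1

-- mathematical list of square strings: from n, at most fuel of them, while n*n ≤ M / n*n < M
def pvSqLE (M : Int) (fuel : Nat) (n : Int) : List String :=
  match fuel with
  | 0 => []
  | fuel + 1 => if n * n > M then [] else PySem.Int.toStr (n * n) :: pvSqLE M fuel (n + 1)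

def pvSqLT (M : Int) (fuel : Nat) (n : Int) : List String :=
  match fuel with
  | 0 => []
  | fuel + 1 => if n * n < M then PySem.Int.toStr (n * n) :: pvSqLT M fuel (n + 1) else []

lemma pvBLoop_eq (nb M : Int) (fuel : Nat) : ∀ n acc,
    pvBLoop nb M fuel n acc = acc ++ (pvSqLT M fuel n).filter
      (fun s => decide (PySem.Str.len s = nb ∧
        PySem.Set.len (PySem.Set.ofList s.toList) = PySem.Str.len s)) := by
  induction fuel with
  | zero => intro n acc; simp [pvBLoop, pvSqLT]
  | succ fuel ih =>
    intro n acc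
    rw [pvBLoop, pvSqLT]
    dsimp only
    by_cases hlt : n * n < M
    · rw [if_pos hlt, if_pos hlt]
      by_cases hc : (PySem.Str.len (PySem.Int.toStr (n * n)) = nb ∧
          PySem.Set.len (PySem.Set.ofList (PySem.Int.toStr (n * n)).toList) =
            PySem.Str.len (PySem.Int.toStr (n * n)))
      · rw [if_pos hc, ih, List.filter_cons]
        have hc' := hc
        simp at hc' ⊢
        simp [hc']
      · rw [if_neg hc, ih, List.filter_cons]
        have hc' := hc
        simp at hc'
        simp
        exact hc'
    · rw [if_neg hlt, if_neg hlt]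
      simp

lemma pvSqLT_mem (M : Int) (fuel : Nat) : ∀ n s, s ∈ pvSqLT M fuel n →
    ∃ m : Int, n ≤ m ∧ s = PySem.Int.toStr (m * m) := by
  induction fuel with
  | zero => intro n s hs; simp [pvSqLT] at hs
  | succ fuel ih =>
    intro n s hs
    rw [pvSqLT] at hs
    by_cases hlt : n * n < M
    · rw [if_pos hlt] at hs
      rcases List.mem_cons.1 hs with rfl | hs
      · exact ⟨n, le_refl n, rfl⟩
      · obtain ⟨m, hm, rfl⟩ := ih (n + 1) _ hs
        exact ⟨m, by omega, rfl⟩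
    · rw [if_neg hlt] at hs
      simp at hs

lemma pvFlatten_replicate (n : Nat) : (List.replicate n ([] : List String)).flatten = [] := by
  induction n with
  | zero => simp
  | succ n ih => simp [List.replicate_succ, ih]

lemma pvFlatten_replicate_set (n j : Nat) (x : List String) (h : j < n) :
    ((List.replicate n ([] : List String)).set j x).flatten = x := by
  induction n generalizing j with
  | zero => omega
  | succ n ih =>
    cases j with
    | zero => simp [List.replicate_succ, pvFlatten_replicate]
    | succ j => simp [List.replicate_succ, ih j (by omega)]

lemma pvSet_same {α : Type} (l : List α) (i : Nat) (v : α) (h : l[i]? = some v) :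
    l.set i v = l := by
  obtain ⟨hi, hv⟩ := List.getElem?_eq_some_iff.1 h
  apply List.ext_getElem (by simp)
  intro j h1 h2
  rw [List.getElem_set]
  split
  · next heq => subst heq; exact hv.symm
  · rfl

lemma pvFoldIf (p : String → Bool) (cat : List String) : ∀ acc,
    cat.foldl (fun a s => if p s then a ++ [s] else a) acc = acc ++ cat.filter p := by
  induction cat with
  | nil => intro acc; simp
  | cons s rest ih =>
    intro acc
    rw [List.foldl_cons, List.filter_cons, ih]
    by_cases hp : p s
    · simp [hp]
    · simp [hp]

lemma pvFoldFilter (p : String → Bool) (cats : List (List String)) : ∀ init,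
    cats.foldl (fun acc cat =>
        cat.foldl (fun a s => if p s then a ++ [s] else a) acc) init =
      init ++ (cats.map (List.filter p)).flatten := by
  induction cats with
  | nil => intro init; simp
  | cons cat rest ih =>
    intro init
    rw [List.foldl_cons, pvFoldIf, ih, List.map_cons, List.flatten_cons, List.append_assoc]

lemma pvGsLoop_inv (k : Nat) (fuel : Nat) : ∀ (n : Int) cats acc, 1 ≤ n →
    cats.length = k + 1 →
    cats.map (fun c => List.filter (fun s => pvDigitValidate s (k : Int)) c.reverse) =
      (List.replicate (k + 1) []).set (k - 1) acc →
    (pvGsLoop (10 ^ k) fuel n cats).map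
        (fun c => List.filter (fun s => pvDigitValidate s (k : Int)) c.reverse) =
      (List.replicate (k + 1) []).set (k - 1)
        (acc ++ (pvSqLE (10 ^ k) fuel n).filter (fun s => pvDigitValidate s (k : Int))) := by
  induction fuel with
  | zero =>
    intro n cats acc hn hlen hinv
    rw [pvGsLoop, pvSqLE]
    simp only [List.filter_nil, List.append_nil]
    exact hinv
  | succ fuel ih =>
    intro n cats acc hn hlen hinv
    rw [pvGsLoop, pvSqLE]
    dsimp only
    by_cases hbr : n * n > 10 ^ k
    · rw [if_pos hbr, if_pos hbr]
      simp only [List.filter_nil, List.append_nil]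
      exact hinv
    · rw [if_neg hbr, if_neg hbr]
      push_neg at hbr
      have hn2 : (1 : Int) ≤ n * n := by nlinarith
      have hts : (PySem.Int.toStr (n * n)).toList = pvD (n * n).toNat :=
        pvToStr_toList _ (by omega)
      have hlen_s : PySem.Str.len (PySem.Int.toStr (n * n)) =
          ((pvD (n * n).toNat).length : Int) := by rw [PySem.Str.len_eq, hts]
      have hd1 : 1 ≤ (pvD (n * n).toNat).length := pvD_length_pos _
      have hub : (n * n).toNat ≤ 10 ^ k := by
        have h10 : ((10 : Int) ^ k) = ((10 ^ k : Nat) : Int) := by push_cast; ring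
        rw [h10] at hbr
        omega
      have hdk : (pvD (n * n).toNat).length ≤ k + 1 := by
        have h1 := pvD_pow_le (n * n).toNat (by omega)
        have h2 : (10 : Nat) ^ ((pvD (n * n).toNat).length - 1) ≤ 10 ^ k :=
          le_trans h1 hub
        have h3 := (Nat.pow_le_pow_iff_right (by omega)).1 h2
        omega
      have hidx : (PySem.Str.len (PySem.Int.toStr (n * n)) - 1).toNat =
          (pvD (n * n).toNat).length - 1 := by rw [hlen_s]; omega
      rw [hidx]
      have hdl : (pvD (n * n).toNat).length - 1 < cats.length := by omega
      have hgetmap : (cats.map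
            (fun c => List.filter (fun s => pvDigitValidate s (k : Int)) c.reverse)).getD
            ((pvD (n * n).toNat).length - 1) [] =
          List.filter (fun s => pvDigitValidate s (k : Int))
            (cats.getD ((pvD (n * n).toNat).length - 1) []).reverse := by
        rw [List.getD_eq_getElem?_getD, List.getD_eq_getElem?_getD, List.getElem?_map,
          List.getElem?_eq_getElem hdl]
        simp
      have hmapset : (cats.set ((pvD (n * n).toNat).length - 1)
            (PySem.Int.toStr (n * n) :: cats.getD ((pvD (n * n).toNat).length - 1) [])).map
            (fun c => List.filter (fun s => pvDigitValidate s (k : Int)) c.reverse) =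
          (cats.map (fun c => List.filter (fun s => pvDigitValidate s (k : Int)) c.reverse)).set
            ((pvD (n * n).toNat).length - 1)
            (List.filter (fun s => pvDigitValidate s (k : Int))
                (cats.getD ((pvD (n * n).toNat).length - 1) []).reverse ++
              List.filter (fun s => pvDigitValidate s (k : Int)) [PySem.Int.toStr (n * n)]) := by
        rw [List.map_set]
        congr 1
        rw [List.reverse_cons, List.filter_append]
      by_cases hik : (pvD (n * n).toNat).length - 1 = k - 1
      · have hfk : List.filter (fun s => pvDigitValidate s (k : Int))
            (cats.getD ((pvD (n * n).toNat).length - 1) []).reverse = acc := by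
          rw [← hgetmap, hinv, hik]
          exact pvGetD_set_self _ _ _ _ (by simp)
        rw [ih (n + 1) _
          (acc ++ List.filter (fun s => pvDigitValidate s (k : Int)) [PySem.Int.toStr (n * n)])
          (by omega) (by simpa using hlen) ?_]
        · rw [List.filter_cons]
          by_cases hfs : pvDigitValidate (PySem.Int.toStr (n * n)) (k : Int)
          · simp [hfs]
          · simp [hfs]
        · rw [hmapset, hfk, hik, hinv, List.set_set]
      · have hfs : pvDigitValidate (PySem.Int.toStr (n * n)) (k : Int) = false := by
          cases hf2 : pvDigitValidate (PySem.Int.toStr (n * n)) (k : Int)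
          · rfl
          · exfalso
            have hlen_nb : PySem.Str.len (PySem.Int.toStr (n * n)) = (k : Int) := by
              by_contra hne
              unfold pvDigitValidate at hf2
              rw [if_pos hne] at hf2
              cases hf2
            rw [hlen_s] at hlen_nb
            have : (pvD (n * n).toNat).length = k := by exact_mod_cast hlen_nb
            omega
        have hcomp0 : List.filter (fun s => pvDigitValidate s (k : Int))
            (cats.getD ((pvD (n * n).toNat).length - 1) []).reverse = [] := by
          rw [← hgetmap, hinv,
            pvGetD_set_ne _ _ _ _ _ (fun h => hik h.symm),
            List.getD_eq_getElem?_getD, List.getElem?_replicate]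
          split <;> rfl
        rw [ih (n + 1) _ acc (by omega) (by simpa using hlen) ?_]
        · rw [List.filter_cons]
          simp [hfs]
        · rw [hmapset, hcomp0, hinv]
          have hfil : List.filter (fun s => pvDigitValidate s (k : Int))
              [PySem.Int.toStr (n * n)] = [] := by
            simp [hfs]
          rw [hfil, List.append_nil]
          apply pvSet_same
          rw [List.getElem?_set_ne (fun h => hik h.symm), List.getElem?_replicate]
          rw [if_pos (by omega)]

lemma pvSqLE_nil (M : Int) (fuel : Nat) (n : Int) (h : n * n > M) : pvSqLE M fuel n = [] := by
  cases fuel <;> simp [pvSqLE, h]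

lemma pvSq_filter_eq (k : Nat) (p : String → Bool) (hp : p (PySem.Int.toStr (10 ^ k)) = false)
    (fuel : Nat) : ∀ n : Int, 1 ≤ n →
    (pvSqLE (10 ^ k) fuel n).filter p = (pvSqLT (10 ^ k) fuel n).filter p := by
  induction fuel with
  | zero => intro n _; simp [pvSqLE, pvSqLT]
  | succ fuel ih =>
    intro n hn
    rw [pvSqLE, pvSqLT]
    rcases lt_trichotomy (n * n) ((10 : Int) ^ k) with hlt | heq | hgt
    · rw [if_neg (by omega), if_pos hlt, List.filter_cons, List.filter_cons,
        ih (n + 1) (by omega)]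
    · rw [if_neg (by omega), if_neg (by omega), List.filter_cons, heq, hp]
      have hbig : (n + 1) * (n + 1) > (10 : Int) ^ k := by nlinarith
      rw [pvSqLE_nil _ _ _ hbig]
      simp
    · rw [if_pos hgt, if_neg (by omega)]

lemma pvToNat_pow (k : Nat) : ((10 : Int) ^ k).toNat = 10 ^ k := by
  have h : ((10 : Int) ^ k) = ((10 ^ k : Nat) : Int) := by push_cast; ring
  rw [h, Int.toNat_natCast]

lemma pvD_pow_length (k : Nat) : (pvD (10 ^ k)).length = k + 1 := by
  have h1 := pvD_lt_pow (10 ^ k)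
  have h2 := pvD_pow_le (10 ^ k) (Nat.one_le_pow _ _ (by omega))
  have h3 : k < (pvD (10 ^ k)).length := (Nat.pow_lt_pow_iff_right (by omega)).1 h1
  have h4 : (pvD (10 ^ k)).length - 1 ≤ k := (Nat.pow_le_pow_iff_right (by omega)).1 h2
  omega

lemma pvLen_toStr_pow (k : Nat) :
    PySem.Str.len (PySem.Int.toStr ((10 : Int) ^ k)) = ((k : Int) + 1) := by
  rw [PySem.Str.len_eq, pvToStr_toList _ (by positivity), pvToNat_pow, pvD_pow_length]
  push_cast
  ring

-- ===== VERDICT (by name: the statement is the Claim_ definition above) =====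
theorem get_square_candidates_spec : Claim_equal_get_square_candidates := by
  intro nb _
  unfold Spec_get_square_candidates
  by_cases hneg : nb < 0
  · unfold get_square_candidates get_square_candidates_alt
    rw [if_pos hneg, if_pos hneg]
  · push_neg at hneg
    obtain ⟨k, rfl⟩ : ∃ k : Nat, nb = (k : Int) := ⟨nb.toNat, by omega⟩
    unfold get_square_candidates get_square_candidates_alt
    rw [if_neg (by omega), if_neg (by omega)]
    dsimp only
    simp only [Int.toNat_natCast]
    rw [pvLen_toStr_pow k]
    rw [show (((k : Int) + 1)).toNat = k + 1 from by omega]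
    rw [pvFoldFilter]
    rw [List.nil_append, List.map_map]
    simp only [Function.comp_def]
    have hbase : (List.replicate (k + 1) ([] : List String)).map
        (fun c => List.filter (fun s => pvDigitValidate s (k : Int)) c.reverse) =
        (List.replicate (k + 1) ([] : List String)).set (k - 1) [] := by
      rw [List.map_replicate]
      simp only [List.reverse_nil, List.filter_nil]
      symm
      apply pvSet_same
      rw [List.getElem?_replicate, if_pos (by omega)]
    rw [pvGsLoop_inv k (((10 : Int) ^ k).toNat + 1) 1 _ [] (by norm_num) (by simp) hbase]
    rw [pvFlatten_replicate_set _ _ _ (by omega), List.nil_append]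
    have hpM : pvDigitValidate (PySem.Int.toStr ((10 : Int) ^ k)) ((k : Int)) = false := by
      unfold pvDigitValidate
      rw [if_pos (by rw [pvLen_toStr_pow]; intro h; omega)]
    rw [pvSq_filter_eq k _ hpM _ 1 (by norm_num)]
    rw [List.filter_congr
      (q := fun s => decide (PySem.Str.len s = (k : Int) ∧
        PySem.Set.len (PySem.Set.ofList s.toList) = PySem.Str.len s))
      (fun x hx => by
        obtain ⟨m, hm, rfl⟩ := pvSqLT_mem _ _ _ _ hx
        exact pvValid_eq (m * m) _ (by nlinarith))]
    rw [pvBLoop_eq, List.nil_append]
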